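-- pv_equiv track=rewrite | github.com/embalmer-Y/NeuroLink | neuro_cli/src/neuro_cli.py | memory_section_deltas
-- ===== SOURCE A (Python) =====
-- from typing import Any, cast
--
-- def memory_section_deltas(
--     baseline_totals: dict[str, Any], candidate_totals: dict[str, Any]
-- ) -> dict[str, dict[str, int]]:
--     deltas: dict[str, dict[str, int]] = {}
--     for region in sorted(set(baseline_totals) | set(candidate_totals)):
--         baseline_value = int(baseline_totals.get(region, 0) or 0)
--         candidate_value = int(candidate_totals.get(region, 0) or 0)
--         deltas[region] = {
--             "baseline_bytes": baseline_value,
--             "candidate_bytes": candidate_value,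
--             "delta_bytes": candidate_value - baseline_value,
--         }
--     return deltas
-- ===== SOURCE B (Python) =====
-- def memory_section_deltas(baseline_totals, candidate_totals):
--     # Sort each side's items once, then a classic two-pointer merge of the two
--     # sorted streams emits the regions in order; no key-union set and no per-region dict lookups.
--     bs = sorted(baseline_totals.items(), key=lambda kv: kv[0])
--     cs = sorted(candidate_totals.items(), key=lambda kv: kv[0])
--     out = {}
--     i = j = 0
--     while i < len(bs) or j < len(cs):
--         if j == len(cs) or (i < len(bs) and bs[i][0] < cs[j][0]):
--             region, b, c = bs[i][0], int(bs[i][1] or 0), 0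
--             i += 1
--         elif i == len(bs) or cs[j][0] < bs[i][0]:
--             region, b, c = cs[j][0], 0, int(cs[j][1] or 0)
--             j += 1
--         else:
--             region, b, c = bs[i][0], int(bs[i][1] or 0), int(cs[j][1] or 0)
--             i += 1
--             j += 1
--         out[region] = {
--             "baseline_bytes": b,
--             "candidate_bytes": c,
--             "delta_bytes": c - b,
--         }
--     return out
-- ===== Notes on version B (the rewrite author's own statement) =====
-- stated objective: alternative
-- what changed: Replaces A's sorted-key-union pass with per-region .get lookups into both dicts by sorting each side's items once and running a classic two-pointer merge of the two sorted streams, emitting each region's row directly from the stream heads.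
import Mathlib
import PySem

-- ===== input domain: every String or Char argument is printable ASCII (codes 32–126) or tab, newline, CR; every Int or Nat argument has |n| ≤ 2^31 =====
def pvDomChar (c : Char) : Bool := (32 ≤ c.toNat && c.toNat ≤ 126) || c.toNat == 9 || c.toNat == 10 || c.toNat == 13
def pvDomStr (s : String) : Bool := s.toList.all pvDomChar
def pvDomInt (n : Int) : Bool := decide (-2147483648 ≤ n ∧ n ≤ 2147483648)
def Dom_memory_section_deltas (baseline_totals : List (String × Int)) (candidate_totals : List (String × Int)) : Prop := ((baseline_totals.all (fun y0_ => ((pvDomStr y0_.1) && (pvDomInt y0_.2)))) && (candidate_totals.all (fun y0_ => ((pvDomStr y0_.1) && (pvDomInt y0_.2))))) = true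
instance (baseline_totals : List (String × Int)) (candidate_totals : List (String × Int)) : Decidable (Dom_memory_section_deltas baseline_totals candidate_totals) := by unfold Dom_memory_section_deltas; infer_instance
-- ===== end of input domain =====

-- B sorts each side's items once and two-pointer-merges the two sorted streams,
-- instead of A's single pass over the sorted key union doing a .get into each dict (objective: alternative).

-- ===== PORT A =====
-- int(v or 0) on an int v: 0 when v == 0 (falsy), else v itself — ported literally as the if below.
def memory_section_deltas (baseline_totals : List (String × Int)) (candidate_totals : List (String × Int)) : List (String × List (String × Int)) :=
  let regions := PySem.List.sorted
      (PySem.Set.union (PySem.Set.ofList (baseline_totals.map Prod.fst))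
                       (PySem.Set.ofList (candidate_totals.map Prod.fst)))
      (fun r => r) false
  (regions.foldl (fun (deltas : PySem.Dict String (List (String × Int))) region =>
      let bv0 := (PySem.Dict.mk baseline_totals).getD region 0
      let baseline_value := if bv0 == 0 then (0 : Int) else bv0
      let cv0 := (PySem.Dict.mk candidate_totals).getD region 0
      let candidate_value := if cv0 == 0 then (0 : Int) else cv0
      deltas.insert region
        [("baseline_bytes", baseline_value), ("candidate_bytes", candidate_value),
         ("delta_bytes", candidate_value - baseline_value)])
    PySem.Dict.empty).items

-- ===== PORT B =====
-- B's while loop over indices i, j into the two sorted lists, transliterated as a recursion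
-- consuming the list fronts (the loop's b, c values inlined into the row; int(v or 0) is the if);
-- out[region] = {…} is the Dict.insert.
def pvMergeLoop (bs cs : List (String × Int)) (out : PySem.Dict String (List (String × Int))) : PySem.Dict String (List (String × Int)) :=
  match bs, cs with
  | [], [] => out
  | (r, v) :: bs', [] =>
      pvMergeLoop bs' []
        (out.insert r [("baseline_bytes", if v == 0 then (0 : Int) else v), ("candidate_bytes", 0),
                       ("delta_bytes", 0 - (if v == 0 then (0 : Int) else v))])
  | [], (r, v) :: cs' =>
      pvMergeLoop [] cs'
        (out.insert r [("baseline_bytes", 0), ("candidate_bytes", if v == 0 then (0 : Int) else v),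
                       ("delta_bytes", (if v == 0 then (0 : Int) else v) - 0)])
  | (rb, vb) :: bs', (rc, vc) :: cs' =>
      if rb < rc then
        pvMergeLoop bs' ((rc, vc) :: cs')
          (out.insert rb [("baseline_bytes", if vb == 0 then (0 : Int) else vb), ("candidate_bytes", 0),
                          ("delta_bytes", 0 - (if vb == 0 then (0 : Int) else vb))])
      else if rc < rb then
        pvMergeLoop ((rb, vb) :: bs') cs'
          (out.insert rc [("baseline_bytes", 0), ("candidate_bytes", if vc == 0 then (0 : Int) else vc),
                          ("delta_bytes", (if vc == 0 then (0 : Int) else vc) - 0)])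
      else
        pvMergeLoop bs' cs'
          (out.insert rb [("baseline_bytes", if vb == 0 then (0 : Int) else vb),
                          ("candidate_bytes", if vc == 0 then (0 : Int) else vc),
                          ("delta_bytes", (if vc == 0 then (0 : Int) else vc) - (if vb == 0 then (0 : Int) else vb))])
  termination_by bs.length + cs.length

def memory_section_deltas_alt (baseline_totals : List (String × Int)) (candidate_totals : List (String × Int)) : List (String × List (String × Int)) :=
  (pvMergeLoop (PySem.List.sorted baseline_totals (fun kv => kv.1) false)
               (PySem.List.sorted candidate_totals (fun kv => kv.1) false)
               PySem.Dict.empty).items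

-- ===== PRECONDITION & SPEC =====
-- Pre_ excludes association lists with duplicate keys: those cannot arise from A's dict[str, Any]
-- arguments, and on them first-match lookup vs. later-entry overwrite is a representation artefact.
def Pre_memory_section_deltas (baseline_totals : List (String × Int)) (candidate_totals : List (String × Int)) : Prop :=
  (baseline_totals.map Prod.fst).Nodup ∧ (candidate_totals.map Prod.fst).Nodup
instance (baseline_totals : List (String × Int)) (candidate_totals : List (String × Int)) : Decidable (Pre_memory_section_deltas baseline_totals candidate_totals) := by unfold Pre_memory_section_deltas; infer_instance
def pvWitness_memory_section_deltas : (List (String × Int)) × (List (String × Int)) :=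
  ([("heap", 3), ("rodata", 0)], [("heap", 5), ("text", 2)])
def Spec_memory_section_deltas (baseline_totals : List (String × Int)) (candidate_totals : List (String × Int)) (out : List (String × List (String × Int))) : Prop := out = memory_section_deltas_alt baseline_totals candidate_totals
instance (baseline_totals : List (String × Int)) (candidate_totals : List (String × Int)) (out : List (String × List (String × Int))) : Decidable (Spec_memory_section_deltas baseline_totals candidate_totals out) := by unfold Spec_memory_section_deltas; infer_instance

-- ===== CLAIM (what is proved, stated in full; the proofs are below) =====
def Claim_equal_memory_section_deltas : Prop := ∀ (baseline_totals : List (String × Int)) (candidate_totals : List (String × Int)), Dom_memory_section_deltas baseline_totals candidate_totals → Pre_memory_section_deltas baseline_totals candidate_totals → Spec_memory_section_deltas baseline_totals candidate_totals (memory_section_deltas baseline_totals candidate_totals)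

-- ===== LEMMAS AND PROOFS =====

-- the normalisation int(v or 0) performs on an int
def pvIfz (v : Int) : Int := if v == 0 then 0 else v

-- the row both programs build for a region with (already normalised) values b, c
def pvRowOf (b c : Int) : List (String × Int) :=
  [("baseline_bytes", b), ("candidate_bytes", c), ("delta_bytes", c - b)]

-- the key stream the merge visits
def pvMergeKeys : List String → List String → List String
  | [], ys => ys
  | x :: xs, [] => x :: pvMergeKeys xs []
  | x :: xs, y :: ys =>
      if x < y then x :: pvMergeKeys xs (y :: ys)
      else if y < x then y :: pvMergeKeys (x :: xs) ys
      else x :: pvMergeKeys xs ys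
  termination_by xs ys => xs.length + ys.length

-- the merge loop's output stream as a pure list
def pvMergeList : List (String × Int) → List (String × Int) → List (String × List (String × Int))
  | [], [] => []
  | (r, v) :: bs', [] => (r, pvRowOf (pvIfz v) 0) :: pvMergeList bs' []
  | [], (r, v) :: cs' => (r, pvRowOf 0 (pvIfz v)) :: pvMergeList [] cs'
  | (rb, vb) :: bs', (rc, vc) :: cs' =>
      if rb < rc then (rb, pvRowOf (pvIfz vb) 0) :: pvMergeList bs' ((rc, vc) :: cs')
      else if rc < rb then (rc, pvRowOf 0 (pvIfz vc)) :: pvMergeList ((rb, vb) :: bs') cs'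
      else (rb, pvRowOf (pvIfz vb) (pvIfz vc)) :: pvMergeList bs' cs'
  termination_by bs cs => bs.length + cs.length

theorem mem_pvMergeKeys (xs ys : List String) (r : String) :
    r ∈ pvMergeKeys xs ys ↔ r ∈ xs ∨ r ∈ ys := by
  fun_induction pvMergeKeys xs ys with
  | case1 ys => simp
  | case2 x xs ih => simp [ih]
  | case3 x xs y ys h ih => simp [ih]; tauto
  | case4 x xs y ys h h' ih => simp [ih]; tauto
  | case5 x xs y ys h h' ih =>
      have hxy : x = y := le_antisymm (not_lt.mp h') (not_lt.mp h)
      simp [ih, hxy]; tauto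

theorem pairwise_pvMergeKeys (xs ys : List String)
    (hx : xs.Pairwise (· < ·)) (hy : ys.Pairwise (· < ·)) :
    (pvMergeKeys xs ys).Pairwise (· < ·) := by
  fun_induction pvMergeKeys xs ys with
  | case1 ys => exact hy
  | case2 x xs ih =>
      rw [List.pairwise_cons] at hx
      exact List.Pairwise.cons (fun r hr => by
        rcases (mem_pvMergeKeys _ _ _).mp hr with h | h
        · exact hx.1 r h
        · simp at h) (ih hx.2 hy)
  | case3 x xs y ys h ih =>
      rw [List.pairwise_cons] at hx
      refine List.Pairwise.cons (fun r hr => ?_) (ih hx.2 hy)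
      rcases (mem_pvMergeKeys _ _ _).mp hr with hm | hm
      · exact hx.1 r hm
      · rcases List.mem_cons.mp hm with rfl | hm
        · exact h
        · exact h.trans ((List.pairwise_cons.mp hy).1 r hm)
  | case4 x xs y ys h h' ih =>
      rw [List.pairwise_cons] at hy
      refine List.Pairwise.cons (fun r hr => ?_) (ih hx hy.2)
      rcases (mem_pvMergeKeys _ _ _).mp hr with hm | hm
      · rcases List.mem_cons.mp hm with rfl | hm
        · exact h'
        · exact h'.trans ((List.pairwise_cons.mp hx).1 r hm)
      · exact hy.1 r hm
  | case5 x xs y ys h h' ih =>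
      have hxy : x = y := le_antisymm (not_lt.mp h') (not_lt.mp h)
      rw [List.pairwise_cons] at hx
      rw [List.pairwise_cons] at hy
      refine List.Pairwise.cons (fun r hr => ?_) (ih hx.2 hy.2)
      rcases (mem_pvMergeKeys _ _ _).mp hr with hm | hm
      · exact hx.1 r hm
      · exact hxy ▸ hy.1 r hm

theorem getD_mk_cons (k : String) (v : Int) (t : List (String × Int)) (r : String) :
    (PySem.Dict.mk ((k, v) :: t)).getD r 0 = if r = k then v else (PySem.Dict.mk t).getD r 0 := by
  rw [PySem.Dict.getD_eq_get?_getD, PySem.Dict.get?_mk_cons]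
  by_cases hr : r = k
  · simp [hr]
  · have hb : (k == r) = false := by
      simp only [beq_eq_false_iff_ne, ne_eq]
      exact fun h => hr h.symm
    simp [hb, hr, PySem.Dict.getD_eq_get?_getD]

theorem getD_mk_of_not_mem (l : List (String × Int)) (r : String)
    (h : r ∉ l.map Prod.fst) : (PySem.Dict.mk l).getD r 0 = 0 := by
  induction l with
  | nil => rfl
  | cons p t ih =>
    obtain ⟨k, v⟩ := p
    simp only [List.map_cons, List.mem_cons, not_or] at h
    rw [getD_mk_cons, if_neg h.1]
    exact ih h.2

-- lookup in a duplicate-free association list is invariant under permutation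
theorem getD_mk_perm (l l' : List (String × Int)) (hp : l.Perm l')
    (hnd : (l.map Prod.fst).Nodup) (r : String) :
    (PySem.Dict.mk l).getD r 0 = (PySem.Dict.mk l').getD r 0 := by
  have hnd' : (l'.map Prod.fst).Nodup := ((hp.map Prod.fst).nodup_iff).mp hnd
  by_cases hm : r ∈ l.map Prod.fst
  · obtain ⟨p, hpl, hp1⟩ := List.mem_map.mp hm
    obtain ⟨k, v⟩ := p
    have hk : k = r := hp1
    rw [hk] at hpl
    have h1 : (PySem.Dict.mk l).getD r 0 = v :=
      PySem.Dict.getD_of_mem_items (d := PySem.Dict.mk l) (by simpa using hpl) (by simpa using hnd) 0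
    have h2 : (PySem.Dict.mk l').getD r 0 = v :=
      PySem.Dict.getD_of_mem_items (d := PySem.Dict.mk l') (by simpa using hp.mem_iff.mp hpl)
        (by simpa using hnd') 0
    rw [h1, h2]
  · rw [getD_mk_of_not_mem l r hm,
        getD_mk_of_not_mem l' r (fun h => hm ((hp.map Prod.fst).mem_iff.mpr h))]

-- the merge loop appends its stream to the dict, provided the incoming keys are fresh and ascending
theorem pvMergeLoop_items (bs cs : List (String × Int)) (out : PySem.Dict String (List (String × Int))) :
    (bs.map Prod.fst).Pairwise (· < ·) → (cs.map Prod.fst).Pairwise (· < ·) →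
    (∀ r ∈ bs.map Prod.fst, out.contains r = false) →
    (∀ r ∈ cs.map Prod.fst, out.contains r = false) →
    (pvMergeLoop bs cs out).items = out.items ++ pvMergeList bs cs := by
  fun_induction pvMergeLoop bs cs out with
  | case1 out =>
      intro _ _ _ _
      simp [pvMergeList]
  | case2 out r v bs' ih =>
      intro hb hc hfb hfc
      simp only [dite_eq_ite] at ih
      rw [pvMergeList.eq_def]
      dsimp only
      simp only [List.map_cons, List.pairwise_cons] at hb
      rw [ih hb.2 hc
          (fun r' hr' => by
            rw [PySem.Dict.contains_insert]
            have : r' ≠ r := ne_of_gt (hb.1 r' hr')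
            simp [this, hfb r' (by simp [hr'])])
          (fun r' hr' => by simp at hr')]
      rw [PySem.Dict.items_insert_of_not_contains _ _ (hfb r (by simp))]
      simp [pvRowOf, pvIfz]
  | case3 out r v cs' ih =>
      intro hb hc hfb hfc
      simp only [dite_eq_ite] at ih
      rw [pvMergeList.eq_def]
      dsimp only
      simp only [List.map_cons, List.pairwise_cons] at hc
      rw [ih hb hc.2
          (fun r' hr' => by simp at hr')
          (fun r' hr' => by
            rw [PySem.Dict.contains_insert]
            have : r' ≠ r := ne_of_gt (hc.1 r' hr')
            simp [this, hfc r' (by simp [hr'])])]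
      rw [PySem.Dict.items_insert_of_not_contains _ _ (hfc r (by simp))]
      simp [pvRowOf, pvIfz]
  | case4 out rb vb bs' rc vc cs' h ih =>
      intro hb hc hfb hfc
      simp only [dite_eq_ite] at ih
      rw [pvMergeList.eq_def]
      dsimp only
      simp only [List.map_cons, List.pairwise_cons] at hb
      have hcall : ∀ r' ∈ rc :: cs'.map Prod.fst, rb < r' := by
        have hc' : (rc :: cs'.map Prod.fst).Pairwise (· < ·) := hc
        intro r' hr'
        rcases List.mem_cons.mp hr' with rfl | hm
        · exact h
        · exact h.trans ((List.pairwise_cons.mp hc').1 r' hm)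
      rw [ih hb.2 hc
          (fun r' hr' => by
            rw [PySem.Dict.contains_insert]
            have : r' ≠ rb := ne_of_gt (hb.1 r' hr')
            simp [this, hfb r' (by simp [hr'])])
          (fun r' hr' => by
            rw [PySem.Dict.contains_insert]
            have : r' ≠ rb := ne_of_gt (hcall r' (by simpa using hr'))
            simp [this, hfc r' hr'])]
      rw [PySem.Dict.items_insert_of_not_contains _ _ (hfb rb (by simp))]
      simp [h, pvRowOf, pvIfz]
  | case5 out rb vb bs' rc vc cs' h h' ih =>
      intro hb hc hfb hfc
      simp only [dite_eq_ite] at ih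
      rw [pvMergeList.eq_def]
      dsimp only
      simp only [List.map_cons, List.pairwise_cons] at hc
      have hball : ∀ r' ∈ rb :: bs'.map Prod.fst, rc < r' := by
        have hb' : (rb :: bs'.map Prod.fst).Pairwise (· < ·) := hb
        intro r' hr'
        rcases List.mem_cons.mp hr' with rfl | hm
        · exact h'
        · exact h'.trans ((List.pairwise_cons.mp hb').1 r' hm)
      rw [ih hb hc.2
          (fun r' hr' => by
            rw [PySem.Dict.contains_insert]
            have : r' ≠ rc := ne_of_gt (hball r' (by simpa using hr'))
            simp [this, hfb r' hr'])
          (fun r' hr' => by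
            rw [PySem.Dict.contains_insert]
            have : r' ≠ rc := ne_of_gt (hc.1 r' hr')
            simp [this, hfc r' (by simp [hr'])])]
      rw [PySem.Dict.items_insert_of_not_contains _ _ (hfc rc (by simp))]
      simp [h, h', pvRowOf, pvIfz]
  | case6 out rb vb bs' rc vc cs' h h' ih =>
      intro hb hc hfb hfc
      simp only [dite_eq_ite] at ih
      have hxy : rb = rc := le_antisymm (not_lt.mp h') (not_lt.mp h)
      rw [pvMergeList.eq_def]
      dsimp only
      simp only [List.map_cons, List.pairwise_cons] at hb hc
      rw [ih hb.2 hc.2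
          (fun r' hr' => by
            rw [PySem.Dict.contains_insert]
            have : r' ≠ rb := ne_of_gt (hb.1 r' hr')
            simp [this, hfb r' (by simp [hr'])])
          (fun r' hr' => by
            rw [PySem.Dict.contains_insert]
            have : r' ≠ rb := hxy ▸ ne_of_gt (hc.1 r' hr')
            simp [this, hfc r' (by simp [hr'])])]
      rw [PySem.Dict.items_insert_of_not_contains _ _ (hfb rb (by simp))]
      simp [h, h', pvRowOf, pvIfz]

-- the merge stream is the per-region lookups over the merged key stream
theorem pvMergeList_spec (bs cs : List (String × Int)) :
    (bs.map Prod.fst).Pairwise (· < ·) → (cs.map Prod.fst).Pairwise (· < ·) →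
    pvMergeList bs cs = (pvMergeKeys (bs.map Prod.fst) (cs.map Prod.fst)).map
      (fun r => (r, pvRowOf (pvIfz ((PySem.Dict.mk bs).getD r 0)) (pvIfz ((PySem.Dict.mk cs).getD r 0)))) := by
  fun_induction pvMergeList bs cs with
  | case1 =>
      intro _ _
      simp [pvMergeKeys]
  | case2 r v bs' ih =>
      intro hb hc
      simp only [List.map_cons, List.map_nil]
      rw [pvMergeKeys.eq_def]
      dsimp only
      simp only [List.map_cons, List.pairwise_cons] at hb
      rw [ih hb.2 hc, List.map_cons]
      refine List.cons_eq_cons.mpr ⟨?_, ?_⟩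
      · try dsimp only
        rw [getD_mk_cons (k := r), if_pos rfl, getD_mk_of_not_mem [] r (by simp)]
        simp [pvIfz]
      · refine List.map_congr_left (fun r' hr' => ?_)
        have hm := (mem_pvMergeKeys _ _ _).mp hr'
        simp only [List.map_nil, List.not_mem_nil, or_false] at hm
        try dsimp only
        rw [getD_mk_cons (k := r), if_neg (ne_of_gt (hb.1 r' hm))]
  | case3 r v cs' ih =>
      intro hb hc
      simp only [List.map_cons, List.map_nil]
      rw [pvMergeKeys.eq_def]
      dsimp only
      simp only [List.map_cons, List.pairwise_cons] at hc
      rw [ih hb hc.2, List.map_cons]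
      refine List.cons_eq_cons.mpr ⟨?_, ?_⟩
      · try dsimp only
        rw [getD_mk_cons (k := r), if_pos rfl, getD_mk_of_not_mem [] r (by simp)]
        simp [pvIfz]
      · simp only [List.map_nil]
        rw [show pvMergeKeys [] (cs'.map Prod.fst) = cs'.map Prod.fst from by simp [pvMergeKeys]]
        refine List.map_congr_left (fun r' hr' => ?_)
        try dsimp only
        rw [getD_mk_cons (k := r), if_neg (ne_of_gt (hc.1 r' hr'))]
  | case4 rb vb bs' rc vc cs' h ih =>
      intro hb hc
      simp only [List.map_cons]
      rw [pvMergeKeys.eq_def]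
      dsimp only
      rw [if_pos h]
      simp only [List.map_cons, List.pairwise_cons] at hb
      have hcall : ∀ r' ∈ rc :: cs'.map Prod.fst, rb < r' := by
        have hc' : (rc :: cs'.map Prod.fst).Pairwise (· < ·) := hc
        intro r' hr'
        rcases List.mem_cons.mp hr' with rfl | hm
        · exact h
        · exact h.trans ((List.pairwise_cons.mp hc').1 r' hm)
      rw [ih hb.2 hc, List.map_cons]
      refine List.cons_eq_cons.mpr ⟨?_, ?_⟩
      · try dsimp only
        rw [getD_mk_cons (k := rb), if_pos rfl,
            getD_mk_of_not_mem ((rc, vc) :: cs') rb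
              (fun hm => absurd (hcall rb (by simpa using hm)) (lt_irrefl rb))]
        simp [pvIfz]
      · refine List.map_congr_left (fun r' hr' => ?_)
        have hm := (mem_pvMergeKeys _ _ _).mp hr'
        have hgt : rb < r' := by
          rcases hm with hm | hm
          · exact hb.1 r' hm
          · exact hcall r' (by simpa using hm)
        try dsimp only
        rw [getD_mk_cons (k := rb), if_neg (ne_of_gt hgt)]
  | case5 rb vb bs' rc vc cs' h h' ih =>
      intro hb hc
      simp only [List.map_cons]
      rw [pvMergeKeys.eq_def]
      dsimp only
      rw [if_neg h, if_pos h']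
      simp only [List.map_cons, List.pairwise_cons] at hc
      have hball : ∀ r' ∈ rb :: bs'.map Prod.fst, rc < r' := by
        have hb' : (rb :: bs'.map Prod.fst).Pairwise (· < ·) := hb
        intro r' hr'
        rcases List.mem_cons.mp hr' with rfl | hm
        · exact h'
        · exact h'.trans ((List.pairwise_cons.mp hb').1 r' hm)
      rw [ih hb hc.2, List.map_cons]
      refine List.cons_eq_cons.mpr ⟨?_, ?_⟩
      · try dsimp only
        rw [getD_mk_cons (k := rc), if_pos rfl,
            getD_mk_of_not_mem ((rb, vb) :: bs') rc
              (fun hm => absurd (hball rc (by simpa using hm)) (lt_irrefl rc))]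
        simp [pvIfz]
      · refine List.map_congr_left (fun r' hr' => ?_)
        have hm := (mem_pvMergeKeys _ _ _).mp hr'
        have hgt : rc < r' := by
          rcases hm with hm | hm
          · exact hball r' (by simpa using hm)
          · exact hc.1 r' hm
        try dsimp only
        rw [getD_mk_cons (k := rc), if_neg (ne_of_gt hgt)]
  | case6 rb vb bs' rc vc cs' h h' ih =>
      intro hb hc
      have hxy : rb = rc := le_antisymm (not_lt.mp h') (not_lt.mp h)
      simp only [List.map_cons]
      rw [pvMergeKeys.eq_def]
      dsimp only
      rw [if_neg h, if_neg h']
      simp only [List.map_cons, List.pairwise_cons] at hb hc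
      rw [ih hb.2 hc.2, List.map_cons]
      refine List.cons_eq_cons.mpr ⟨?_, ?_⟩
      · try dsimp only
        rw [getD_mk_cons (k := rb), if_pos rfl, getD_mk_cons (k := rc), if_pos hxy]
      · refine List.map_congr_left (fun r' hr' => ?_)
        have hm := (mem_pvMergeKeys _ _ _).mp hr'
        have hgt : rb < r' := by
          rcases hm with hm | hm
          · exact hb.1 r' hm
          · exact hxy ▸ hc.1 r' hm
        try dsimp only
        rw [getD_mk_cons (k := rb), if_neg (ne_of_gt hgt),
            getD_mk_cons (k := rc), if_neg (ne_of_gt (hxy ▸ hgt))]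

-- a loop inserting the sorted (hence distinct) regions into a fresh dict is a map
theorem items_out (L : List String) (hnd : L.Nodup) (v : String → List (String × Int)) :
    (L.foldl (fun d region => d.insert region (v region)) PySem.Dict.empty).items
      = L.map (fun r => (r, v r)) := by
  have h := PySem.Dict.items_foldl_insert_fresh L (fun r : String => r) v PySem.Dict.empty
    (fun a _ => PySem.Dict.contains_empty a) (by simpa using hnd)
  simpa using h

-- ===== VERDICT (by name: the statement is the Claim_ definition above) =====
theorem memory_section_deltas_spec : Claim_equal_memory_section_deltas := by
  intro bt ct _ hpre
  obtain ⟨hb, hc⟩ := hpre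
  unfold Spec_memory_section_deltas memory_section_deltas memory_section_deltas_alt
  dsimp only
  set sb := PySem.List.sorted bt (fun kv : String × Int => kv.1) false with hsb
  set sc := PySem.List.sorted ct (fun kv : String × Int => kv.1) false with hsc
  have hpb : sb.Perm bt := PySem.List.sorted_perm bt _ false
  have hpc : sc.Perm ct := PySem.List.sorted_perm ct _ false
  have hndb : (sb.map Prod.fst).Nodup := ((hpb.map Prod.fst).nodup_iff).mpr hb
  have hndc : (sc.map Prod.fst).Nodup := ((hpc.map Prod.fst).nodup_iff).mpr hc
  have hsbp : (sb.map Prod.fst).Pairwise (· < ·) := by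
    have hle := PySem.List.sorted_map_key_pairwise bt (fun kv : String × Int => kv.1)
    exact ((hle.and hndb).imp (fun hab => lt_of_le_of_ne hab.1 hab.2))
  have hscp : (sc.map Prod.fst).Pairwise (· < ·) := by
    have hle := PySem.List.sorted_map_key_pairwise ct (fun kv : String × Int => kv.1)
    exact ((hle.and hndc).imp (fun hab => lt_of_le_of_ne hab.1 hab.2))
  rw [pvMergeLoop_items sb sc PySem.Dict.empty hsbp hscp
        (fun r _ => PySem.Dict.contains_empty r) (fun r _ => PySem.Dict.contains_empty r),
      show (PySem.Dict.empty : PySem.Dict String (List (String × Int))).items ++ _ = _ from rfl,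
      pvMergeList_spec sb sc hsbp hscp]
  set K := pvMergeKeys (sb.map Prod.fst) (sc.map Prod.fst) with hK
  have hKp : K.Pairwise (· < ·) := pairwise_pvMergeKeys _ _ hsbp hscp
  have hKnd : K.Nodup := hKp.imp ne_of_lt
  have hndU : (PySem.Set.union (PySem.Set.ofList (bt.map Prod.fst))
      (PySem.Set.ofList (ct.map Prod.fst))).Nodup :=
    PySem.Set.nodup_union _ _ (PySem.Set.nodup_ofList _)
  have hperm : K.Perm (PySem.Set.union (PySem.Set.ofList (bt.map Prod.fst))
      (PySem.Set.ofList (ct.map Prod.fst))) := by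
    rw [List.perm_ext_iff_of_nodup hKnd hndU]
    intro a
    rw [hK, mem_pvMergeKeys]
    simp [PySem.Set.mem_union, PySem.Set.mem_ofList, (hpb.map Prod.fst).mem_iff,
      (hpc.map Prod.fst).mem_iff]
  have hregions : PySem.List.sorted
      (PySem.Set.union (PySem.Set.ofList (bt.map Prod.fst)) (PySem.Set.ofList (ct.map Prod.fst)))
      (fun r : String => r) false = K :=
    PySem.List.sorted_eq_of_perm_of_pairwise_lt _ _ _ hperm hKp
  rw [hregions, items_out _ hKnd]
  refine List.map_congr_left (fun r _ => ?_)
  rw [getD_mk_perm sb bt hpb hndb r, getD_mk_perm sc ct hpc hndc r]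
  simp [pvRowOf, pvIfz]
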